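-- pv_equiv track=rewrite | github.com/Anton1618/Python | practice_functions/sort_numbers_by_counting_with_offset.py | number_count
-- ===== SOURCE A (Python) =====
-- def number_count(lst):
--     '''Подсчет и сортировка со смещением только числовых значений'''
--     offset = min(lst)
--     lst_count = [0] * (max(lst) - min(lst) + 1)
--     index_offset = abs(offset) if offset < 0 else -offset
--     for i in lst:
--         lst_count[i + index_offset] += 1
--     result = []
--     for i in range(len(lst_count)):
--         if lst_count[i] > 0:
--             result.append((i-index_offset, lst_count[i]))
--     return result
-- ===== SOURCE B (Python) =====
-- def number_count(lst):
--     '''Подсчет и сортировка со смещением только числовых значений'''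
--     s = sorted(lst)
--     result = []
--     prev = s[0]
--     count = 0
--     for v in s:
--         if v == prev:
--             count += 1
--         else:
--             result.append((prev, count))
--             prev = v
--             count = 1
--     result.append((prev, count))
--     return result
-- ===== Notes on version B (the rewrite author's own statement) =====
-- stated objective: faster
-- what changed: Replaces the offset-indexed counting array (size max-min+1) scanned over the whole value range with sort-then-group: one pass over sorted(lst) emitting (value, run length) pairs, avoiding the range-sized allocation and scan.
import Mathlib
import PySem

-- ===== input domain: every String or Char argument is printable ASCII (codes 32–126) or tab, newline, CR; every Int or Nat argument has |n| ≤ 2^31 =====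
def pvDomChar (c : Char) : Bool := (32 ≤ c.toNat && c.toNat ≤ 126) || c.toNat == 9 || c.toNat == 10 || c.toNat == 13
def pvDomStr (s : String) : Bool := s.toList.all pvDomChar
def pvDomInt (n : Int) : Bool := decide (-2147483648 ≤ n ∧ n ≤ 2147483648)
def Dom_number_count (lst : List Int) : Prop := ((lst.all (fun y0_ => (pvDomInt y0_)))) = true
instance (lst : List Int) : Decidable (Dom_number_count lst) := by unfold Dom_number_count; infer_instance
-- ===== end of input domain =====

-- B replaces A's offset-indexed counting array with a sort-then-group single pass (alternative algorithm).

-- ===== PORT A =====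
-- lst_count[j] += 1 (the index is always in range on admitted inputs; out of range would raise in Python)
def ncIncAt (c : Array Int) (j : Int) : Array Int :=
  if 0 ≤ j then c.setIfInBounds j.toNat (c.getD j.toNat 0 + 1) else c

-- lst_count[i] for the indices produced by range(len(lst_count)) (nonnegative, in range); exact there
def ncGet (c : Array Int) (i : Int) : Int := c.getD i.toNat 0

def number_count (lst : List Int) : List (Int × Int) :=
  match PySem.List.min? lst (fun x => x), PySem.List.max? lst (fun x => x) with
  | some offset, some mx =>
    let lst_count : Array Int := Array.replicate (mx - offset + 1).toNat 0
    let index_offset : Int := if offset < 0 then |offset| else -offset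
    let counts := lst.foldl (fun c i => ncIncAt c (i + index_offset)) lst_count
    (PySem.List.pyRange 0 (counts.size : Int) 1).foldl
      (fun res i =>
        if ncGet counts i > 0 then
          res ++ [(i - index_offset, ncGet counts i)]
        else res) []
  | _, _ => []   -- min() of an empty list raises ValueError; excluded by Pre_

-- ===== PORT B =====
-- the grouping loop: prev = current run value, count = its running count
def ncGroup : List Int → Int → Int → List (Int × Int) → List (Int × Int)
  | [], prev, count, acc => acc ++ [(prev, count)]
  | v :: rest, prev, count, acc =>
    if v = prev then ncGroup rest prev (count + 1) acc
    else ncGroup rest v 1 (acc ++ [(prev, count)])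

def number_count_alt (lst : List Int) : List (Int × Int) :=
  match PySem.List.sorted lst (fun x => x) false with
  | [] => []   -- s[0] raises IndexError on the empty list; excluded by Pre_
  | x :: t => ncGroup (x :: t) x 0 []

-- ===== PRECONDITION & SPEC =====
-- On the empty list A raises ValueError (min of empty) and B raises IndexError (s[0]); excluded.
def Pre_number_count (lst : List Int) : Prop := lst ≠ []
instance (lst : List Int) : Decidable (Pre_number_count lst) := by unfold Pre_number_count; infer_instance
def pvWitness_number_count : List Int := [3, -1, 3, 0]

def Spec_number_count (lst : List Int) (out : List (Int × Int)) : Prop := out = number_count_alt lst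
instance (lst : List Int) (out : List (Int × Int)) : Decidable (Spec_number_count lst out) := by unfold Spec_number_count; infer_instance

-- ===== CLAIM (what is proved, stated in full; the proofs are below) =====
def Claim_equal_number_count : Prop := ∀ (lst : List Int), Dom_number_count lst → Pre_number_count lst → Spec_number_count lst (number_count lst)

-- ===== LEMMAS AND PROOFS =====

-- canonical form: ascending (value, multiplicity) pairs of a sorted list
def ncCanon : List Int → List (Int × Int)
  | [] => []
  | x :: t => (x, (1 : Int) + (t.count x : Int)) :: ncCanon (t.filter (· ≠ x))
termination_by s => s.length
decreasing_by
  simpa using le_trans (List.length_filter_le _ _) (le_of_eq List.length_attach)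

theorem ncCanon_nil : ncCanon [] = [] := by rw [ncCanon]

theorem ncCanon_cons (x : Int) (t : List Int) :
    ncCanon (x :: t) = (x, (1 : Int) + (t.count x : Int)) :: ncCanon (t.filter (· ≠ x)) := by
  rw [ncCanon]

theorem ncGroup_eq_canon :
    ∀ (s : List Int) (prev count : Int) (acc : List (Int × Int)),
      s.Pairwise (· ≤ ·) → (∀ y ∈ s, prev ≤ y) →
      ncGroup s prev count acc
        = acc ++ (prev, count + (s.count prev : Int)) :: ncCanon (s.filter (· ≠ prev)) := by
  intro s
  induction s with
  | nil => intro prev count acc _ _; simp [ncGroup, ncCanon_nil]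
  | cons v rest ih =>
    intro prev count acc hs hle
    have hs' := (List.pairwise_cons.mp hs)
    by_cases hv : v = prev
    · subst hv
      rw [ncGroup, if_pos rfl, ih _ _ _ hs'.2 hs'.1]
      simp only [List.count_cons_self, List.filter_cons]
      simp only [ne_eq, not_true_eq_false, decide_false]
      push_cast
      ring_nf
    · have hprevlt : ∀ y ∈ v :: rest, prev < y := by
        intro y hy
        rcases List.mem_cons.mp hy with h | h
        · subst h; exact lt_of_le_of_ne (hle _ (List.mem_cons_self ..)) (Ne.symm hv)
        · exact lt_of_lt_of_le (lt_of_le_of_ne (hle _ (List.mem_cons_self ..)) (Ne.symm hv)) (hs'.1 _ h)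
      have hnot : prev ∉ v :: rest := fun h => lt_irrefl prev (hprevlt _ h)
      have hcount : (v :: rest).count prev = 0 := List.count_eq_zero.mpr hnot
      have hfilter : (v :: rest).filter (· ≠ prev) = v :: rest := by
        apply List.filter_eq_self.mpr
        intro y hy
        simp [ne_of_gt (hprevlt _ hy)]
      rw [ncGroup, if_neg hv, ih _ _ _ hs'.2 hs'.1, hcount, hfilter, ncCanon_cons]
      simp

-- membership in ncCanon of a sorted list (length-bounded induction)
theorem ncCanon_mem_aux :
    ∀ (n : Nat) (s : List Int), s.length ≤ n → s.Pairwise (· ≤ ·) →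
      ∀ (v c : Int), (v, c) ∈ ncCanon s ↔ v ∈ s ∧ c = (s.count v : Int) := by
  intro n
  induction n with
  | zero =>
    intro s hlen _ v c
    have : s = [] := List.eq_nil_of_length_eq_zero (Nat.le_zero.mp hlen)
    subst this; simp [ncCanon_nil]
  | succ n ih =>
    intro s hlen hs v c
    match s with
    | [] => simp [ncCanon_nil]
    | x :: t =>
      have hs' := List.pairwise_cons.mp hs
      have hfs : (t.filter (· ≠ x)).Pairwise (· ≤ ·) := hs'.2.filter _
      have hflen : (t.filter (· ≠ x)).length ≤ n :=
        le_trans (List.length_filter_le _ _) (by simpa using Nat.lt_succ_iff.mp (Nat.lt_of_lt_of_le (by simp) hlen))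
      rw [ncCanon_cons]
      simp only [List.mem_cons, Prod.mk.injEq]
      rw [ih _ hflen hfs v c]
      constructor
      · rintro (⟨hv, hc⟩ | ⟨hmem, hc⟩)
        · subst hv
          refine ⟨Or.inl rfl, ?_⟩
          rw [hc, List.count_cons_self]; push_cast; ring
        · have hv : v ∈ t ∧ v ≠ x := by simpa using List.mem_filter.mp hmem
          refine ⟨Or.inr hv.1, ?_⟩
          rw [hc, List.count_filter (by simp [hv.2])]
          simp [Ne.symm hv.2]
      · rintro ⟨hv | hv, hc⟩
        · subst hv
          left
          refine ⟨rfl, ?_⟩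
          rw [hc, List.count_cons_self]; push_cast; ring
        · by_cases hvx : v = x
          · subst hvx
            left
            refine ⟨rfl, ?_⟩
            rw [hc, List.count_cons_self]; push_cast; ring
          · right
            refine ⟨List.mem_filter.mpr (by simp [hv, hvx]), ?_⟩
            rw [hc, List.count_filter (by simp [hvx])]
            simp [Ne.symm hvx]

theorem ncCanon_mem (s : List Int) (hs : s.Pairwise (· ≤ ·)) (v c : Int) :
    (v, c) ∈ ncCanon s ↔ v ∈ s ∧ c = (s.count v : Int) :=
  ncCanon_mem_aux s.length s le_rfl hs v c

theorem ncCanon_sorted_aux :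
    ∀ (n : Nat) (s : List Int), s.length ≤ n → s.Pairwise (· ≤ ·) →
      (ncCanon s).Pairwise (fun a b => a.1 < b.1) := by
  intro n
  induction n with
  | zero =>
    intro s hlen _
    have : s = [] := List.eq_nil_of_length_eq_zero (Nat.le_zero.mp hlen)
    subst this; simp [ncCanon_nil]
  | succ n ih =>
    intro s hlen hs
    match s with
    | [] => simp [ncCanon_nil]
    | x :: t =>
      have hs' := List.pairwise_cons.mp hs
      have hfs : (t.filter (· ≠ x)).Pairwise (· ≤ ·) := hs'.2.filter _
      have hflen : (t.filter (· ≠ x)).length ≤ n :=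
        le_trans (List.length_filter_le _ _) (by simpa using Nat.lt_succ_iff.mp (Nat.lt_of_lt_of_le (by simp) hlen))
      rw [ncCanon_cons]
      refine List.pairwise_cons.mpr ⟨?_, ih _ hflen hfs⟩
      intro p hp
      have hmem := (ncCanon_mem _ hfs p.1 p.2).mp (by simpa using hp)
      have hvt : p.1 ∈ t ∧ p.1 ≠ x := by simpa using List.mem_filter.mp hmem.1
      exact lt_of_le_of_ne (hs'.1 _ hvt.1) (Ne.symm hvt.2)

-- B = ncCanon of the sorted list
theorem alt_eq_canon (lst : List Int) (h : lst ≠ []) :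
    number_count_alt lst = ncCanon (PySem.List.sorted lst (fun x => x) false) := by
  unfold number_count_alt
  have hperm := PySem.List.sorted_perm lst (fun x => x) false
  have hsnil : PySem.List.sorted lst (fun x => x) false ≠ [] := by
    intro hc; exact h ((hc ▸ hperm).symm.eq_nil)
  obtain ⟨x, t, hxt⟩ := List.exists_cons_of_ne_nil hsnil
  have hsorted : (PySem.List.sorted lst (fun x => x) false).Pairwise (· ≤ ·) := by
    simpa using PySem.List.sorted_pairwise (xs := lst) (key := fun x => x)
  rw [hxt] at hsorted ⊢
  have hs' := List.pairwise_cons.mp hsorted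
  change ncGroup (x :: t) x 0 [] = ncCanon (x :: t)
  rw [ncGroup_eq_canon _ _ _ _ hsorted ?hle]
  case hle =>
    intro y hy
    rcases List.mem_cons.mp hy with h | h
    · exact le_of_eq h.symm
    · exact hs'.1 _ h
  have hfilter : (x :: t).filter (· ≠ x) = t.filter (· ≠ x) := by
    simp
  rw [hfilter, ncCanon_cons]
  simp
  ring

-- counting loop: length preserved and value characterization
theorem nc_fold_size (io : Int) :
    ∀ (l : List Int) (c : Array Int),
      (l.foldl (fun c i => ncIncAt c (i + io)) c).size = c.size := by
  intro l
  induction l with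
  | nil => intro c; rfl
  | cons i t ih =>
    intro c
    rw [List.foldl_cons, ih]
    unfold ncIncAt
    split <;> simp

theorem nc_fold_getD (io : Int) :
    ∀ (l : List Int) (c : Array Int) (j : Nat),
      (∀ i ∈ l, 0 ≤ i + io ∧ i + io < (c.size : Int)) →
      (l.foldl (fun c i => ncIncAt c (i + io)) c).getD j 0
        = c.getD j 0 + (l.count ((j : Int) - io) : Int) := by
  intro l
  induction l with
  | nil => intro c j _; simp
  | cons i t ih =>
    intro c j hb
    have hbi := hb i (List.mem_cons_self ..)
    rw [List.foldl_cons, ih _ j ?hb']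
    case hb' =>
      intro i' hi'
      have := hb i' (List.mem_cons_of_mem _ hi')
      have hlen : (ncIncAt c (i + io)).size = c.size := by
        unfold ncIncAt; split <;> simp
      rw [hlen]; exact this
    have hstep : (ncIncAt c (i + io)).getD j 0
        = c.getD j 0 + (if i = (j : Int) - io then 1 else 0) := by
      unfold ncIncAt
      rw [if_pos hbi.1]
      by_cases hj : (i + io).toNat = j
      · have hij : i = (j : Int) - io := by omega
        rw [if_pos hij]
        have hjlt : j < c.size := by omega
        simp [Array.getD_eq_getD_getElem?, hj, hjlt]
      · have hij : ¬ i = (j : Int) - io := by omega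
        rw [if_neg hij]
        simp [Array.getD_eq_getD_getElem?, hj]
    rw [hstep, List.count_cons]
    by_cases hij : i = (j : Int) - io
    · simp [hij]; ring
    · simp [hij]

-- A's body after min/max are resolved (proof-side name for the match branch)
def ncResultIf (offset mx : Int) (lst : List Int) : List (Int × Int) :=
  let lst_count : Array Int := Array.replicate (mx - offset + 1).toNat 0
  let index_offset : Int := if offset < 0 then |offset| else -offset
  let counts := lst.foldl (fun c i => ncIncAt c (i + index_offset)) lst_count
  (PySem.List.pyRange 0 (counts.size : Int) 1).foldl
    (fun res i =>
      if ncGet counts i > 0 then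
        res ++ [(i - index_offset, ncGet counts i)]
      else res) []

-- membership and sortedness of A's result
theorem a_result_char (lst : List Int) (h : lst ≠ []) :
    (∀ v c : Int, (v, c) ∈ number_count lst ↔ v ∈ lst ∧ c = (lst.count v : Int)) ∧
      (number_count lst).Pairwise (fun a b => a.1 < b.1) := by
  obtain ⟨m, hm⟩ : ∃ m, PySem.List.min? lst (fun x => x) = some m := by
    cases hmin : PySem.List.min? lst (fun x => x) with
    | none => exact absurd ((PySem.List.min?_eq_none_iff _ _).mp hmin) h
    | some m => exact ⟨m, rfl⟩
  obtain ⟨M, hM⟩ : ∃ M, PySem.List.max? lst (fun x => x) = some M := by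
    cases hmax : PySem.List.max? lst (fun x => x) with
    | none => exact absurd ((PySem.List.max?_eq_none_iff _ _).mp hmax) h
    | some M => exact ⟨M, rfl⟩
  have hmle : ∀ y ∈ lst, m ≤ y := by
    intro y hy; exact PySem.List.min?_isMin hm y hy
  have hMge : ∀ y ∈ lst, y ≤ M := by
    intro y hy; exact PySem.List.max?_isMax hM y hy
  have hmM : m ≤ M := hMge m (PySem.List.min?_mem hm)
  have hA : number_count lst = ncResultIf m M lst := by
    unfold number_count ncResultIf
    rw [hm, hM]
  have hio : (if m < 0 then |m| else -m) = -m := by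
    split <;> [exact abs_of_neg (by assumption); ring]
  rw [hA]
  simp only [ncResultIf, hio]
  set L : Nat := (M - m + 1).toNat with hL
  have hLpos : (L : Int) = M - m + 1 := by omega
  set counts := lst.foldl (fun c i => ncIncAt c (i + -m)) (Array.replicate L 0) with hcounts
  have hclen : counts.size = L := by
    rw [hcounts, nc_fold_size]; simp
  have hbound : ∀ i ∈ lst, 0 ≤ i + -m ∧ i + -m < ((Array.replicate L (0:Int)).size : Int) := by
    intro i hi
    have h1 := hmle i hi
    have h2 := hMge i hi
    simp only [Array.size_replicate]
    omega
  have hget : ∀ j : Nat, counts.getD j 0 = (lst.count ((j : Int) + m) : Int) := by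
    intro j
    rw [hcounts, nc_fold_getD _ _ _ _ hbound]
    have h0 : (Array.replicate L (0:Int)).getD j 0 = 0 := by
      simp [Array.getD]
    have h1 : (j : Int) - -m = (j : Int) + m := by ring
    rw [h0, h1, zero_add]
  rw [PySem.List.foldl_append_ite]
  constructor
  · intro v c
    simp only [List.nil_append, List.mem_map, List.mem_filter]
    constructor
    · rintro ⟨i, ⟨hiR, hip⟩, hvc⟩
      have hi := PySem.List.mem_pyRange_one.mp hiR
      have hi0 : 0 ≤ i := hi.1
      have hgd : ncGet counts i = counts.getD i.toNat 0 := rfl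
      have hcnt : counts.getD i.toNat 0 = (lst.count (i + m) : Int) := by
        rw [hget i.toNat, Int.toNat_of_nonneg hi0]
      have hv : v = i - -m := congrArg Prod.fst hvc.symm
      have hc : c = ncGet counts i := congrArg Prod.snd hvc.symm
      have hvi : v = i + m := by rw [hv]; ring
      have hpos : (0 : Int) < (lst.count (i + m) : Int) := by
        rw [← hcnt, ← hgd]; exact of_decide_eq_true hip
      have hmem : (i + m) ∈ lst := by
        have : 0 < lst.count (i + m) := by exact_mod_cast hpos
        exact List.count_pos_iff.mp this
      exact ⟨hvi ▸ hmem, by rw [hc, hgd, hcnt, hvi]⟩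
    · rintro ⟨hv, hc⟩
      have hm1 := hmle v hv
      have hM1 := hMge v hv
      have hgd : ncGet counts (v - m) = counts.getD (v - m).toNat 0 := rfl
      have hcnt : counts.getD (v - m).toNat 0 = (lst.count v : Int) := by
        rw [hget, Int.toNat_of_nonneg (by omega : (0:Int) ≤ v - m)]
        norm_num
      refine ⟨v - m, ⟨PySem.List.mem_pyRange_one.mpr ⟨by omega, by rw [hclen]; omega⟩, ?_⟩, ?_⟩
      · have hposn : 0 < lst.count v := List.count_pos_iff.mpr hv
        apply decide_eq_true
        rw [hgd, hcnt]
        exact_mod_cast hposn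
      · rw [hgd, hcnt, hc]
        congr 1
        ring
  · simp only [List.nil_append]
    refine List.Pairwise.map _ ?_ ((PySem.List.pairwise_lt_pyRange_one ..).filter _)
    intro a b hab
    show a - -m < b - -m
    omega

-- ===== VERDICT (by name: the statement is the Claim_ definition above) =====
theorem number_count_spec : Claim_equal_number_count := by
  intro lst _ hpre
  unfold Spec_number_count
  have hchar := a_result_char lst hpre
  rw [alt_eq_canon lst hpre]
  have hperm := PySem.List.sorted_perm lst (fun x => x) false
  have hsorted : (PySem.List.sorted lst (fun x => x) false).Pairwise (· ≤ ·) := by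
    simpa using PySem.List.sorted_pairwise (xs := lst) (key := fun x => x)
  have hcmem := ncCanon_mem _ hsorted
  have hcsort := ncCanon_sorted_aux (PySem.List.sorted lst (fun x => x) false).length _ le_rfl hsorted
  have hmemiff : ∀ p : Int × Int, p ∈ number_count lst ↔ p ∈ ncCanon (PySem.List.sorted lst (fun x => x) false) := by
    intro ⟨v, c⟩
    rw [hchar.1 v c, hcmem v c, List.Perm.mem_iff hperm, hperm.count_eq]
  have hnd1 : (number_count lst).Nodup :=
    hchar.2.imp (fun h => by intro he; rw [he] at h; exact lt_irrefl _ h)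
  have hnd2 : (ncCanon (PySem.List.sorted lst (fun x => x) false)).Nodup :=
    hcsort.imp (fun h => by intro he; rw [he] at h; exact lt_irrefl _ h)
  have hperm2 : (number_count lst).Perm (ncCanon (PySem.List.sorted lst (fun x => x) false)) :=
    (List.perm_ext_iff_of_nodup hnd1 hnd2).mpr hmemiff
  exact List.Perm.eq_of_pairwise (fun a b _ _ h1 h2 => absurd h2 (not_lt.mpr h1.le)) hchar.2 hcsort hperm2
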